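-- pv_equiv track=rewrite | github.com/EricHayter/logic-cli | karnaugh.py | included_minterms
-- ===== SOURCE A (Python) =====
-- def included_minterms(minterms: list[tuple], implicant: tuple) -> list[tuple]:
--     included = []
--     for minterm in minterms:
--         for m, i in zip(minterm, implicant):
--             if i and i != m:
--                 break
--             elif i == False and i != m:
--                 break
--         else:
--             included.append(minterm)
--     return included
-- ===== SOURCE B (Python) =====
-- def included_minterms(minterms: list[tuple], implicant: tuple) -> list[tuple]:
--     # Successive narrowing: walk the implicant once; each constrained position
--     # prunes the surviving candidate list in its own pass.
--     survivors = list(minterms)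
--     for idx, v in enumerate(implicant):
--         if v is None:
--             continue
--         survivors = [mt for mt in survivors if idx >= len(mt) or mt[idx] == v]
--     return survivors
-- ===== Notes on version B (the rewrite author's own statement) =====
-- stated objective: alternative
-- what changed: B inverts the loop nesting: it iterates over the implicant positions and, for each constrained position, prunes the surviving candidate list in a separate pass (successive narrowing), instead of A's per-minterm scan over the zipped tuple with break/else.
import Mathlib
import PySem

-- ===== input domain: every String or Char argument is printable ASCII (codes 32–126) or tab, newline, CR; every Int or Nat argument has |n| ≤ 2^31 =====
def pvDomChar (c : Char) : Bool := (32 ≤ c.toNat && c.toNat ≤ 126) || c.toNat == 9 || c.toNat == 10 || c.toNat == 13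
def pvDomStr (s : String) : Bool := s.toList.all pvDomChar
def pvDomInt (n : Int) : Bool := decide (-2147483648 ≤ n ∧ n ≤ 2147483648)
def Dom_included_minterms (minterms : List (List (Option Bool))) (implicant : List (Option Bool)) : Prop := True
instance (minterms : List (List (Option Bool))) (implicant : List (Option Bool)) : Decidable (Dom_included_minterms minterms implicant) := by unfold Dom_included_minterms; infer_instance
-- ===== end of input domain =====

-- B inverts the loop nesting: it walks implicant positions and prunes the surviving minterm list
-- in one pass per constrained position (successive narrowing), instead of A's per-minterm zip scan;
-- objective: alternative.
-- ===== PORT A =====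
-- A's inner 'for m, i in zip(minterm, implicant)' with break/else: true iff no break fires
def pvLoopA : List (Option Bool) → List (Option Bool) → Bool
  | m :: ms, i :: is =>
    if (i == some true) && (i != m) then false
    else if (i == some false) && (i != m) then false
    else pvLoopA ms is
  | _, _ => true

def included_minterms (minterms : List (List (Option Bool))) (implicant : List (Option Bool)) : List (List (Option Bool)) :=
  minterms.foldl (fun included minterm =>
    if pvLoopA minterm implicant then included ++ [minterm] else included) []

-- ===== PORT B =====
-- 'for idx, v in enumerate(implicant): if v is None: continue; survivors = [mt for mt in survivors if idx >= len(mt) or mt[idx] == v]'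
def included_minterms_alt (minterms : List (List (Option Bool))) (implicant : List (Option Bool)) : List (List (Option Bool)) :=
  (PySem.List.enumerate implicant 0).foldl (fun survivors p =>
    if p.2 == none then survivors
    else survivors.filter (fun mt =>
      decide ((mt.length : Int) ≤ p.1) || (PySem.List.pyGetD mt p.1 none == p.2))) minterms

-- ===== PRECONDITION & SPEC =====
def Spec_included_minterms (minterms : List (List (Option Bool))) (implicant : List (Option Bool)) (out : List (List (Option Bool))) : Prop := out = included_minterms_alt minterms implicant
instance (minterms : List (List (Option Bool))) (implicant : List (Option Bool)) (out : List (List (Option Bool))) : Decidable (Spec_included_minterms minterms implicant out) := by unfold Spec_included_minterms; infer_instance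

-- ===== CLAIM (what is proved, stated in full; the proofs are below) =====
def Claim_equal_included_minterms : Prop := ∀ (minterms : List (List (Option Bool))) (implicant : List (Option Bool)), Dom_included_minterms minterms implicant → Spec_included_minterms minterms implicant (included_minterms minterms implicant)

-- ===== LEMMAS AND PROOFS =====

-- the per-step test B applies at one enumerated position
def pvCheck (p : Int × Option Bool) (mt : List (Option Bool)) : Bool :=
  p.2 == none || decide ((mt.length : Int) ≤ p.1) || (PySem.List.pyGetD mt p.1 none == p.2)

-- folding one filter per step = one filter by the conjunction of all step tests
theorem pv_fold_filters (steps : List (Int × Option Bool)) (xs : List (List (Option Bool))) :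
    steps.foldl (fun survivors p =>
      if p.2 == none then survivors
      else survivors.filter (fun mt =>
        decide ((mt.length : Int) ≤ p.1) || (PySem.List.pyGetD mt p.1 none == p.2))) xs
    = xs.filter (fun mt => steps.all (fun p => pvCheck p mt)) := by
  induction steps generalizing xs with
  | nil => simp
  | cons p ps ih =>
    simp only [List.foldl_cons, List.all_cons]
    by_cases hp : p.2 = none
    · rw [if_pos (by simp [hp])]
      rw [ih]
      apply List.filter_congr
      intro mt _
      simp [pvCheck, hp]
    · rw [if_neg (by simp [hp])]
      rw [ih, List.filter_filter]
      apply List.filter_congr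
      intro mt _
      have hn : p.2.isNone = false := by
        cases h : p.2 <;> simp_all
      simp [pvCheck, hn, Bool.and_comm]

-- the conjunction of B's step tests over the enumerated implicant = A's inner loop
theorem pv_all_eq_loopA (imp full : List (Option Bool)) (k : Nat) :
    (PySem.List.enumerate imp (k : Int)).all (fun p => pvCheck p full)
      = pvLoopA (full.drop k) imp := by
  induction imp generalizing k with
  | nil => cases full.drop k <;> simp [PySem.List.enumerate, pvLoopA]
  | cons i is ih =>
    rw [PySem.List.enumerate_cons]
    rcases hd : full.drop k with _ | ⟨m, ms⟩
    · have hk : full.length ≤ k := by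
        by_contra h
        have := List.drop_eq_nil_iff.mp hd
        omega
      have hall : ∀ p ∈ PySem.List.enumerate (i :: is) (k : Int),
          pvCheck p full = true := by
        intro p hp
        rcases (PySem.List.mem_enumerate_iff _ _ _).mp hp with ⟨j, hj, rfl⟩
        have hle : ((full.length : Int)) ≤ (k : Int) + (j : Int) := by
          push_cast; omega
        simp [pvCheck, hle]
      rw [List.all_eq_true.mpr (by intro p hp; exact hall p (by rw [PySem.List.enumerate_cons]; exact hp))]
      rfl
    · have hk : k < full.length := by
        by_contra h
        rw [List.drop_eq_nil_iff.mpr (by omega)] at hd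
        simp at hd
      have hm : PySem.List.pyGetD full (k : Int) none = m := by
        have h1 : full[k]? = some m := by
          rw [← List.head?_drop, hd]; rfl
        simp [PySem.List.pyGetD_natCast, List.getD_eq_getElem?_getD, h1]
      have hms : full.drop (k + 1) = ms := by
        rw [← List.tail_drop, hd]; rfl
      have hstep : ((k : Int) + 1) = ((k + 1 : Nat) : Int) := by push_cast; ring
      rw [List.all_cons, hstep, ih (k + 1), hms]
      rcases i with _ | b
      · simp [pvCheck, pvLoopA]
      · rcases b <;> rcases m with _ | ⟨_ | _⟩ <;>
          simp [pvCheck, pvLoopA, hm,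
            Int.not_le.mpr (by exact_mod_cast hk : (k : Int) < (full.length : Int))]

-- ===== VERDICT (by name: the statement is the Claim_ definition above) =====
theorem included_minterms_spec : Claim_equal_included_minterms := by
  intro minterms implicant _
  unfold Spec_included_minterms included_minterms included_minterms_alt
  rw [PySem.List.foldl_append_if_eq_filter]
  simp only [List.nil_append]
  rw [pv_fold_filters]
  apply List.filter_congr
  intro mt _
  have := pv_all_eq_loopA implicant mt 0
  simpa using this.symm
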